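-- pv_equiv track=rewrite | github.com/Madabaru/sdn-payless | g3_payless/visualization/link_utilization.py | prepare_stats
-- ===== SOURCE A (Python) =====
-- def prepare_stats(calculated_stats, smoothen_factor):
--     """
--     Smooths out the calculated statistics and prepares them for
--     visualization.
--     :param calculated_stats: The previously calculated statistics
--     :type calculated_stats: dict
--     :param smoothen_factor: The length of the interval to which to smoothen
--                             the data
--     :type smoothen_factor: int
--     :return: The prepared statistics in the following format:
--                 {label: [(timestamp, bytes)]}
--     :rtype: dict
--     """
--     prepared = {}
--     maximum_timestamp = 0
--
--     for identifier, datapoints in calculated_stats.items():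
--         prepared[identifier] = []
--
--         collected = {}
--
--         for millisecond, byte_count in datapoints.items():
--             new_timestamp = int(millisecond / smoothen_factor)
--
--             if new_timestamp > maximum_timestamp:
--                 maximum_timestamp = new_timestamp
--
--             if new_timestamp not in collected:
--                 collected[new_timestamp] = []
--             collected[new_timestamp].append(byte_count)
--
--         for new_timestamp, values in collected.items():
--             value = sorted(values)[int(len(values) / 2)]  # median
--             prepared[identifier].append((new_timestamp, value))
--
--     for identifier in prepared:
--
--         nonzero_timestamps = [x[0] for x in prepared[identifier]]
--         for timestamp in range(0, maximum_timestamp):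
--             if timestamp not in nonzero_timestamps:
--                 prepared[identifier].append((timestamp, 0))
--
--         prepared[identifier].sort(key=lambda x: x[0])
--
--     return prepared
-- ===== SOURCE B (Python) =====
-- def prepare_stats(calculated_stats, smoothen_factor):
--     """Sort-group-scan per identifier, then a two-pointer merge with the
--     zero range; no per-bucket dict, no membership test, no final re-sort."""
--     medians_by_id = {}
--     maximum_timestamp = 0
--
--     for identifier, datapoints in calculated_stats.items():
--         events = sorted(
--             ((int(millisecond / smoothen_factor), byte_count)
--              for millisecond, byte_count in datapoints.items()),
--             key=lambda p: p[0])
--         medians = []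
--         while events:
--             t = events[0][0]
--             k = 1
--             while k < len(events) and events[k][0] == t:
--                 k += 1
--             values = sorted(v for _, v in events[:k])
--             medians.append((t, values[k // 2]))
--             if t > maximum_timestamp:
--                 maximum_timestamp = t
--             events = events[k:]
--         medians_by_id[identifier] = medians
--
--     return {identifier: _merge_fill(range(0, maximum_timestamp), medians)
--             for identifier, medians in medians_by_id.items()}
--
--
-- def _merge_fill(timestamps, medians):
--     out = []
--     k = 0
--     for t in timestamps:
--         while k < len(medians) and medians[k][0] < t:
--             out.append(medians[k])
--             k += 1
--         if k < len(medians) and medians[k][0] == t: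
--             out.append(medians[k])
--             k += 1
--         else:
--             out.append((t, 0))
--     return out + medians[k:]
-- ===== Notes on version B (the rewrite author's own statement) =====
-- stated objective: alternative
-- what changed: Instead of A's per-identifier dict of bucket->value-lists with per-bucket sorting for medians and a membership-tested zero-fill loop followed by a re-sort, B sorts each identifier's (bucket, value) pairs once, extracts medians by a linear group scan over the sorted run, and produces the final list by a two-pointer merge of the ordered median list with range(0, maximum_timestamp) - no bucket dict, no membership test, no final sort.
import Mathlib
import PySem

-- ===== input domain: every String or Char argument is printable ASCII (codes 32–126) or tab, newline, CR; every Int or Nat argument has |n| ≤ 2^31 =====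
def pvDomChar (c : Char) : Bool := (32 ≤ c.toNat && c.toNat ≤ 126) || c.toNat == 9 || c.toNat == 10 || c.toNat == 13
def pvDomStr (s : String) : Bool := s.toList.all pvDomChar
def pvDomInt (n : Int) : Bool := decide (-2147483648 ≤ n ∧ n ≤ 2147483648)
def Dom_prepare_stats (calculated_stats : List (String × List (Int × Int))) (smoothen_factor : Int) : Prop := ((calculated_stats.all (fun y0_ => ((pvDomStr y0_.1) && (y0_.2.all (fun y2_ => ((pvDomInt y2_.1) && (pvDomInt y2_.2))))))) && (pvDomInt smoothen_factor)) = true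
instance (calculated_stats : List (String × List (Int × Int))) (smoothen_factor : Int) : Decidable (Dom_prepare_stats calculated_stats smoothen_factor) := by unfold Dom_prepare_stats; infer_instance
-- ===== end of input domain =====

-- B replaces A's dict-of-buckets with medians plus zero-fill-and-re-sort by a sort-group-scan
-- per identifier and a two-pointer merge with the zero range; objective: alternative (same cost).
-- int(ms / sf) is exact truncating division on the |·| ≤ 2^31 domain (PySem.Int.truncdiv);
-- Python's in-range list indexing values[k] is ported as pyGetD with default 0 (index always in range).

-- ===== PORT A =====
def prepare_stats (calculated_stats : List (String × List (Int × Int))) (smoothen_factor : Int) : List (String × List (Int × Int)) :=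
  let s1 : PySem.Dict String (List (Int × Int)) × Int :=
    calculated_stats.foldl (fun acc item =>
      let prepared := acc.1.insert item.1 []
      let inner : PySem.Dict Int (List Int) × Int :=
        item.2.foldl (fun acc2 dp =>
          let new_timestamp := PySem.Int.truncdiv dp.1 smoothen_factor
          let m := if new_timestamp > acc2.2 then new_timestamp else acc2.2
          let c := if acc2.1.contains new_timestamp then acc2.1 else acc2.1.insert new_timestamp []
          (c.modify new_timestamp [] (fun l => l ++ [dp.2]), m))
          (PySem.Dict.empty, acc.2)
      let prepared2 :=
        inner.1.items.foldl (fun p pr =>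
          let value := PySem.List.pyGetD (PySem.List.sorted pr.2 (fun x => x)) ((pr.2.length / 2 : Nat) : Int) 0
          p.modify item.1 [] (fun l => l ++ [(pr.1, value)])) prepared
      (prepared2, inner.2)) (PySem.Dict.empty, 0)
  let prepared2 := s1.1.keys.foldl (fun p identifier =>
      let lst := p.getD identifier []
      let nonzero := lst.map (fun x : Int × Int => x.1)
      let filled := (PySem.List.pyRange 0 s1.2 1).foldl
        (fun l timestamp => if timestamp ∉ nonzero then l ++ [(timestamp, (0:Int))] else l) lst
      p.insert identifier (PySem.List.sorted filled (fun x => x.1))) s1.1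
  prepared2.items

-- ===== PORT B =====
-- the group scan over the fst-sorted event list: per contiguous run of one bucket,
-- emit (bucket, sorted(values)[len/2]) and update the running maximum
def pvScanB : List (Int × Int) → Int → List (Int × Int) × Int
  | [], m => ([], m)
  | (t, v) :: rest, m =>
    let grp := (t, v) :: rest.takeWhile (fun p => p.1 == t)
    let values := PySem.List.sorted (grp.map (fun p => p.2)) (fun x => x)
    let med := PySem.List.pyGetD values ((grp.length / 2 : Nat) : Int) 0
    let m' := if t > m then t else m
    let r := pvScanB (rest.dropWhile (fun p => p.1 == t)) m'
    ((t, med) :: r.1, r.2)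
termination_by es _ => es.length
decreasing_by
  simp only [List.length_cons]
  exact Nat.lt_succ_of_le (List.length_dropWhile_le _ _)

-- the two-pointer merge of the ordered median list with range(0, maximum_timestamp)
def pvMergeFill : List Int → List (Int × Int) → List (Int × Int)
  | [], ms => ms
  | t :: ts, [] => (t, 0) :: pvMergeFill ts []
  | t :: ts, (tm, v) :: ms =>
    if tm < t then (tm, v) :: pvMergeFill (t :: ts) ms
    else if tm = t then (tm, v) :: pvMergeFill ts ms
    else (t, 0) :: pvMergeFill ts ((tm, v) :: ms)
termination_by ts ms => ts.length + ms.length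

def prepare_stats_alt (calculated_stats : List (String × List (Int × Int))) (smoothen_factor : Int) : List (String × List (Int × Int)) :=
  let s1 : PySem.Dict String (List (Int × Int)) × Int :=
    calculated_stats.foldl (fun acc item =>
      let events := PySem.List.sorted
        (item.2.map (fun dp => (PySem.Int.truncdiv dp.1 smoothen_factor, dp.2))) (fun p => p.1)
      let r := pvScanB events acc.2
      (acc.1.insert item.1 r.1, r.2)) (PySem.Dict.empty, 0)
  s1.1.items.map (fun p => (p.1, pvMergeFill (PySem.List.pyRange 0 s1.2 1) p.2))

-- ===== PRECONDITION & SPEC =====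
-- Pre_ excludes exactly the inputs on which Python A raises ZeroDivisionError:
-- smoothen_factor = 0 together with at least one datapoint to divide.
def Pre_prepare_stats (calculated_stats : List (String × List (Int × Int))) (smoothen_factor : Int) : Prop := smoothen_factor ≠ 0 ∨ ∀ p ∈ calculated_stats, p.2 = []
instance (calculated_stats : List (String × List (Int × Int))) (smoothen_factor : Int) : Decidable (Pre_prepare_stats calculated_stats smoothen_factor) := by unfold Pre_prepare_stats; infer_instance
def pvWitness_prepare_stats : (List (String × List (Int × Int))) × Int := ([("a", [(3, 5), (4, 7)]), ("b", [(-2, 1)])], 2)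

def Spec_prepare_stats (calculated_stats : List (String × List (Int × Int))) (smoothen_factor : Int) (out : List (String × List (Int × Int))) : Prop := out = prepare_stats_alt calculated_stats smoothen_factor
instance (calculated_stats : List (String × List (Int × Int))) (smoothen_factor : Int) (out : List (String × List (Int × Int))) : Decidable (Spec_prepare_stats calculated_stats smoothen_factor out) := by unfold Spec_prepare_stats; infer_instance

-- ===== CLAIM (what is proved, stated in full; the proofs are below) =====
def Claim_equal_prepare_stats : Prop := ∀ (calculated_stats : List (String × List (Int × Int))) (smoothen_factor : Int), Dom_prepare_stats calculated_stats smoothen_factor → Pre_prepare_stats calculated_stats smoothen_factor → Spec_prepare_stats calculated_stats smoothen_factor (prepare_stats calculated_stats smoothen_factor)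

-- ===== LEMMAS AND PROOFS =====

-- the shared median of one bucket (sorted(values)[len(values)//2])
def pvMed (vs : List Int) : Int :=
  PySem.List.pyGetD (PySem.List.sorted vs (fun x => x)) ((vs.length / 2 : Nat) : Int) 0

-- the (bucket, value) pairs an identifier's datapoints generate
def pvPairs (sf : Int) (dps : List (Int × Int)) : List (Int × Int) :=
  dps.map (fun dp => (PySem.Int.truncdiv dp.1 sf, dp.2))

-- the canonical per-bucket entry: (t, median of all values landing in bucket t of l)
def pvG (l : List (Int × Int)) (t : Int) : Int × Int :=
  (t, pvMed ((l.filter (fun q => q.1 == t)).map (fun q => q.2)))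

-- the running-maximum step
def pvMax (m : Int) (p : Int × Int) : Int := if p.1 > m then p.1 else m

-- A's bucket dict for one identifier, and A's per-identifier median list
def pvC (sf : Int) (dps : List (Int × Int)) : PySem.Dict Int (List Int) :=
  (pvPairs sf dps).foldl (fun d p => d.modify p.1 [] (fun l => l ++ [p.2])) PySem.Dict.empty

def pvLstA (sf : Int) (dps : List (Int × Int)) : List (Int × Int) :=
  (pvC sf dps).items.map (fun pr => (pr.1, pvMed pr.2))

-- A's per-datapoint inner loop body
def pvInnerA (sf : Int) (acc2 : PySem.Dict Int (List Int) × Int) (dp : Int × Int) :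
    PySem.Dict Int (List Int) × Int :=
  let new_timestamp := PySem.Int.truncdiv dp.1 sf
  let m := if new_timestamp > acc2.2 then new_timestamp else acc2.2
  let c := if acc2.1.contains new_timestamp then acc2.1 else acc2.1.insert new_timestamp []
  (c.modify new_timestamp [] (fun l => l ++ [dp.2]), m)

-- A's per-identifier phase-1 loop body
def pvStepA (sf : Int) (acc : PySem.Dict String (List (Int × Int)) × Int)
    (item : String × List (Int × Int)) : PySem.Dict String (List (Int × Int)) × Int :=
  let inner := item.2.foldl (pvInnerA sf) (PySem.Dict.empty, acc.2)
  (inner.1.items.foldl (fun p pr => p.modify item.1 [] (fun l => l ++ [(pr.1, pvMed pr.2)]))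
    (acc.1.insert item.1 []), inner.2)

-- B's per-identifier phase-1 loop body
def pvStepB (sf : Int) (acc : PySem.Dict String (List (Int × Int)) × Int)
    (item : String × List (Int × Int)) : PySem.Dict String (List (Int × Int)) × Int :=
  let events := PySem.List.sorted (pvPairs sf item.2) (fun p => p.1)
  let r := pvScanB events acc.2
  (acc.1.insert item.1 r.1, r.2)

-- A's per-identifier phase 2: fill missing timestamps with 0, then sort by timestamp
def pvFinA (M : Int) (lst : List (Int × Int)) : List (Int × Int) :=
  PySem.List.sorted
    ((PySem.List.pyRange 0 M 1).foldl
      (fun l timestamp => if timestamp ∉ lst.map (fun x : Int × Int => x.1) then l ++ [(timestamp, (0:Int))] else l) lst)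
    (fun x => x.1)

-- the value stored by B for an identifier is the fst-sorted version of A's
def pvRelF (lst : List (Int × Int)) : List (Int × Int) := PySem.List.sorted lst (fun x => x.1)

theorem pv_innerA_eq (sf : Int) : pvInnerA sf = fun acc2 dp =>
    (acc2.1.modify (PySem.Int.truncdiv dp.1 sf) [] (fun l => l ++ [dp.2]),
     pvMax acc2.2 (PySem.Int.truncdiv dp.1 sf, dp.2)) := by
  funext acc2 dp
  simp only [pvInnerA, pvMax]
  congr 1
  by_cases h : acc2.1.contains (PySem.Int.truncdiv dp.1 sf) = true
  · simp [h]
  · simp only [Bool.not_eq_true] at h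
    simp only [h, Bool.false_eq_true, if_false, PySem.Dict.modify]
    rw [PySem.Dict.getD_insert_self, PySem.Dict.insert_insert_self,
      PySem.Dict.getD_of_not_contains _ _ h]

theorem pv_innerA_decompose (sf : Int) (dps : List (Int × Int))
    (d : PySem.Dict Int (List Int)) (m : Int) :
    dps.foldl (pvInnerA sf) (d, m)
      = ((pvPairs sf dps).foldl (fun d p => d.modify p.1 [] (fun l => l ++ [p.2])) d,
         (pvPairs sf dps).foldl pvMax m) := by
  rw [pv_innerA_eq,
    PySem.List.foldl_prod_mk (f := fun d (dp : Int × Int) => PySem.Dict.modify d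
        (PySem.Int.truncdiv dp.1 sf) [] (fun l => l ++ [dp.2]))
      (g := fun m (dp : Int × Int) => pvMax m (PySem.Int.truncdiv dp.1 sf, dp.2)),
    pvPairs, List.foldl_map, List.foldl_map]

-- A's inner values: pvLstA is pvC.keys mapped through the canonical entry
theorem pv_lstA_char (sf : Int) (dps : List (Int × Int)) :
    pvLstA sf dps = (pvC sf dps).keys.map (pvG (pvPairs sf dps))
      ∧ (pvC sf dps).keys.Nodup
      ∧ (∀ t, t ∈ (pvC sf dps).keys ↔ t ∈ (pvPairs sf dps).map (fun p => p.1)) := by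
  have hnd : (pvC sf dps).keys.Nodup :=
    PySem.Dict.nodup_keys_foldl_modify_key (pvPairs sf dps) (fun p => p.1) []
      (fun _ p => fun t => t ++ [p.2]) _ PySem.Dict.nodup_keys_empty
  have hmem : ∀ t, t ∈ (pvC sf dps).keys ↔ t ∈ (pvPairs sf dps).map (fun p => p.1) := by
    intro t
    have hk := PySem.Dict.keys_foldl_modify_key (pvPairs sf dps) (fun p => p.1) []
      (fun _ p => fun t => t ++ [p.2]) (PySem.Dict.empty : PySem.Dict Int (List Int))
    show t ∈ (pvC sf dps).keys ↔ _
    rw [pvC, hk, PySem.Set.mem_update]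
    simp [PySem.Dict.empty, PySem.Dict.keys]
  refine ⟨?_, hnd, hmem⟩
  rw [pvLstA, PySem.Dict.items_eq_map_keys (pvC sf dps) hnd [], List.map_map]
  apply List.map_congr_left
  intro t _
  show (t, pvMed ((pvC sf dps).getD t [])) = pvG (pvPairs sf dps) t
  have hgetD : (pvC sf dps).getD t []
      = ((pvPairs sf dps).filter (fun q => q.1 == t)).map (fun q => q.2) := by
    have h := PySem.Dict.getD_foldl_modify_append (pvPairs sf dps)
      (PySem.Dict.empty : PySem.Dict Int (List Int)) t
    rw [PySem.Dict.getD_of_not_contains _ _ (PySem.Dict.contains_empty t)] at h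
    simpa [pvC] using h
  rw [hgetD]; rfl

-- pvLstA's bucket list is exactly pvC.keys
theorem pv_lstA_fst (sf : Int) (dps : List (Int × Int)) :
    (pvLstA sf dps).map (fun p : Int × Int => p.1) = (pvC sf dps).keys := by
  rw [(pv_lstA_char sf dps).1, List.map_map]
  have h : ((fun p : Int × Int => p.1) ∘ pvG (pvPairs sf dps)) = fun t => t := by
    funext t; rfl
  rw [h]
  exact List.map_id' _

-- the scan of an fst-sorted event list: strictly increasing buckets, canonical entries,
-- bucket set = event fst set
theorem pv_scan_char (es : List (Int × Int)) (m : Int)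
    (h : es.Pairwise (fun a b => a.1 ≤ b.1)) :
    (pvScanB es m).1.Pairwise (fun a b => a.1 < b.1)
      ∧ (∀ p ∈ (pvScanB es m).1, p = pvG es p.1)
      ∧ (∀ t, t ∈ (pvScanB es m).1.map (fun p => p.1) ↔ t ∈ es.map (fun p => p.1)) := by
  revert h
  fun_induction pvScanB es m with
  | case1 m => intro _; simp
  | case2 t v rest m grp values med m' r ih =>
    intro h
    have hrest : rest.Pairwise (fun a b => a.1 ≤ b.1) := (List.pairwise_cons.mp h).2
    have hle : ∀ p ∈ rest, t ≤ p.1 := (List.pairwise_cons.mp h).1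
    have hsplit : rest.takeWhile (fun p => p.1 == t) ++ rest.dropWhile (fun p => p.1 == t) = rest :=
      List.takeWhile_append_dropWhile
    have htwt : ∀ p ∈ rest.takeWhile (fun p => p.1 == t), p.1 = t := fun p hp => by
      simpa using List.mem_takeWhile_imp hp
    have hdrsub : (rest.dropWhile (fun p => p.1 == t)).Sublist rest :=
      (List.dropWhile_suffix _).sublist
    have hdrpw : (rest.dropWhile (fun p => p.1 == t)).Pairwise (fun a b => a.1 ≤ b.1) :=
      hrest.sublist hdrsub
    have hdrgt : ∀ p ∈ rest.dropWhile (fun p => p.1 == t), t < p.1 := by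
      intro p hp
      rcases hd : rest.dropWhile (fun p => p.1 == t) with _ | ⟨d0, d'⟩
      · rw [hd] at hp; cases hp
      · have hne : ¬ d0.1 = t := by
          have hh := List.head_dropWhile_not (fun p : Int × Int => p.1 == t) (by rw [hd]; simp)
          simp only [hd, List.head_cons] at hh
          simpa using hh
        rw [hd] at hp
        have hd0r : d0 ∈ rest := hdrsub.mem (by rw [hd]; exact List.mem_cons_self ..)
        have hd0t : t < d0.1 := lt_of_le_of_ne (hle d0 hd0r) (fun e => hne e.symm)
        rcases List.mem_cons.mp hp with rfl | hp
        · exact hd0t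
        · have : d0.1 ≤ p.1 := by
            have := hdrpw; rw [hd] at this
            exact (List.pairwise_cons.mp this).1 p hp
          omega
    have hfil : ((t, v) :: rest).filter (fun q => q.1 == t) = grp := by
      show _ = (t, v) :: rest.takeWhile (fun p => p.1 == t)
      rw [List.filter_cons, if_pos (by simp)]
      congr 1
      conv_lhs => rw [← hsplit]
      rw [List.filter_append,
        List.filter_eq_self.mpr (fun p hp => by simp [htwt p hp]),
        List.filter_eq_nil_iff.mpr (fun p hp => by simp [Int.ne_of_gt (hdrgt p hp)]),
        List.append_nil]
    have hGt : pvG ((t, v) :: rest) t = (t, med) := by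
      have hmed : med = pvMed (grp.map (fun p => p.2)) := by
        show PySem.List.pyGetD (PySem.List.sorted (grp.map (fun p => p.2)) (fun x => x))
          ((grp.length / 2 : Nat) : Int) 0 = _
        simp only [pvMed, List.length_map]
      rw [pvG, hfil, hmed]
    have hGlift : ∀ s, t < s → pvG ((t, v) :: rest) s = pvG (rest.dropWhile (fun p => p.1 == t)) s := by
      intro s hs
      simp only [pvG]
      congr 2
      rw [List.filter_cons, if_neg (by simp only [beq_iff_eq]; omega)]
      conv_lhs => rw [← hsplit]
      rw [List.filter_append,
        List.filter_eq_nil_iff.mpr (fun p hp => by simp only [htwt p hp, beq_iff_eq]; omega),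
        List.nil_append]
    obtain ⟨ihpw, ihent, ihmem⟩ := ih hdrpw
    have hrfst : ∀ s ∈ r.1.map (fun p : Int × Int => p.1), t < s := by
      intro s hs
      have := (ihmem s).mp hs
      rcases List.mem_map.mp this with ⟨q, hq, hqe⟩
      rw [← hqe]; exact hdrgt q hq
    refine ⟨?_, ?_, ?_⟩
    · refine List.pairwise_cons.mpr ⟨?_, ihpw⟩
      intro y hy
      exact hrfst y.1 (List.mem_map_of_mem hy)
    · intro p hp
      rcases List.mem_cons.mp hp with rfl | hp
      · exact hGt.symm
      · have hpe := ihent p hp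
        have hlt : t < p.1 := hrfst p.1 (List.mem_map_of_mem hp)
        rw [hGlift p.1 hlt]
        exact hpe
    · intro s
      simp only [List.map_cons, List.mem_cons]
      constructor
      · rintro (rfl | hs)
        · left; rfl
        · right
          have := (ihmem s).mp hs
          rcases List.mem_map.mp this with ⟨q, hq, hqe⟩
          exact hqe ▸ List.mem_map_of_mem (hdrsub.mem hq)
      · rintro (rfl | hs)
        · left; rfl
        · rcases List.mem_map.mp hs with ⟨q, hq, hqe⟩
          rw [← hsplit] at hq
          rcases List.mem_append.mp hq with hq | hq
          · left; rw [← hqe, htwt q hq]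
          · right; exact (ihmem s).mpr (hqe ▸ List.mem_map_of_mem hq)

theorem pv_scan_max (es : List (Int × Int)) (m : Int)
    (h : es.Pairwise (fun a b => a.1 ≤ b.1)) :
    (pvScanB es m).2 = es.foldl pvMax m := by
  have htw_fold : ∀ (l : List (Int × Int)) (m0 : Int), (∀ p ∈ l, p.1 ≤ m0) →
      l.foldl pvMax m0 = m0 := by
    intro l
    induction l with
    | nil => intro m0 _; rfl
    | cons a l ihl =>
      intro m0 hall
      rw [List.foldl_cons]
      have ha : pvMax m0 a = m0 := by
        have := hall a (List.mem_cons_self ..)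
        simp only [pvMax]
        split_ifs <;> omega
      rw [ha]
      exact ihl m0 (fun p hp => hall p (List.mem_cons_of_mem _ hp))
  revert h
  fun_induction pvScanB es m with
  | case1 m => intro _; rfl
  | case2 t v rest m grp values med m' r ih =>
    intro h
    have hrest : rest.Pairwise (fun a b => a.1 ≤ b.1) := (List.pairwise_cons.mp h).2
    have hsplit : rest.takeWhile (fun p => p.1 == t) ++ rest.dropWhile (fun p => p.1 == t) = rest :=
      List.takeWhile_append_dropWhile
    have htwt : ∀ p ∈ rest.takeWhile (fun p => p.1 == t), p.1 = t := fun p hp => by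
      simpa using List.mem_takeWhile_imp hp
    have hdrpw : (rest.dropWhile (fun p => p.1 == t)).Pairwise (fun a b => a.1 ≤ b.1) :=
      hrest.sublist (List.dropWhile_suffix _).sublist
    have hm' : m' = pvMax m (t, v) := by
      show (if t > m then t else m) = _
      simp [pvMax]
    have hge : t ≤ pvMax m (t, v) := by
      simp only [pvMax]
      split_ifs <;> omega
    show r.2 = _
    rw [List.foldl_cons]
    conv_rhs => rw [← hsplit]
    rw [List.foldl_append]
    have h1 : (rest.takeWhile (fun p => p.1 == t)).foldl pvMax (pvMax m (t, v)) = pvMax m (t, v) :=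
      htw_fold _ _ (fun p hp => by rw [htwt p hp]; exact hge)
    rw [h1, ← hm']
    exact ih hdrpw

theorem pv_max_perm {l l' : List (Int × Int)} (h : l.Perm l') (m : Int) :
    l.foldl pvMax m = l'.foldl pvMax m := by
  haveI : RightCommutative pvMax := ⟨fun b a₁ a₂ => by
    simp only [pvMax]; split_ifs <;> omega⟩
  exact List.Perm.foldl_eq h m

theorem pv_med_perm {l l' : List Int} (h : l.Perm l') : pvMed l = pvMed l' := by
  unfold pvMed
  rw [PySem.List.sorted_eq_sorted_of_perm l l' (fun x => x) (fun a b hab => hab) h, h.length_eq]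

theorem pv_G_perm {l l' : List (Int × Int)} (h : l.Perm l') (t : Int) : pvG l t = pvG l' t := by
  unfold pvG
  rw [pv_med_perm ((h.filter _).map _)]

-- B's median list is the fst-sorted version of A's, and both maxima agree
theorem pv_msB_eq (sf : Int) (dps : List (Int × Int)) (m : Int) :
    (pvScanB (PySem.List.sorted (pvPairs sf dps) (fun p => p.1)) m).1 = pvRelF (pvLstA sf dps)
      ∧ (pvScanB (PySem.List.sorted (pvPairs sf dps) (fun p => p.1)) m).2
          = (dps.foldl (pvInnerA sf) ((PySem.Dict.empty : PySem.Dict Int (List Int)), m)).2 := by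
  have hes_pw : (PySem.List.sorted (pvPairs sf dps) (fun p : Int × Int => p.1)).Pairwise
      (fun a b => a.1 ≤ b.1) := PySem.List.sorted_pairwise _ _
  have hes_perm : (PySem.List.sorted (pvPairs sf dps) (fun p : Int × Int => p.1)).Perm
      (pvPairs sf dps) := PySem.List.sorted_perm _ _ _
  obtain ⟨hpw, hent, hmem⟩ := pv_scan_char _ m hes_pw
  obtain ⟨hl, hnd, hkeys⟩ := pv_lstA_char sf dps
  constructor
  · -- scan.1 = sorted (pvLstA) by fst
    have hBfst_nodup : ((pvScanB (PySem.List.sorted (pvPairs sf dps) (fun p : Int × Int => p.1)) m).1.map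
        (fun p : Int × Int => p.1)).Nodup :=
      (List.pairwise_map.mpr hpw).imp (fun h => ne_of_lt h)
    have hAfst : (pvLstA sf dps).map (fun p : Int × Int => p.1) = (pvC sf dps).keys :=
      pv_lstA_fst sf dps
    have hfstperm : ((pvScanB (PySem.List.sorted (pvPairs sf dps) (fun p : Int × Int => p.1)) m).1.map
        (fun p : Int × Int => p.1)).Perm ((pvLstA sf dps).map (fun p : Int × Int => p.1)) := by
      rw [List.perm_ext_iff_of_nodup hBfst_nodup (by rw [hAfst]; exact hnd)]
      intro s
      rw [hmem s, hAfst, hkeys s]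
      constructor
      · intro hs
        exact (hes_perm.map (fun p : Int × Int => p.1)).mem_iff.mp hs
      · intro hs
        exact (hes_perm.map (fun p : Int × Int => p.1)).mem_iff.mpr hs
    have hBeq : (pvScanB (PySem.List.sorted (pvPairs sf dps) (fun p : Int × Int => p.1)) m).1
        = ((pvScanB (PySem.List.sorted (pvPairs sf dps) (fun p : Int × Int => p.1)) m).1.map
            (fun p : Int × Int => p.1)).map (pvG (pvPairs sf dps)) := by
      rw [List.map_map]
      conv_lhs => rw [← List.map_id ((pvScanB (PySem.List.sorted (pvPairs sf dps) (fun p : Int × Int => p.1)) m).1)]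
      apply List.map_congr_left
      intro p hp
      show p = pvG (pvPairs sf dps) p.1
      rw [← pv_G_perm hes_perm p.1]
      exact hent p hp
    have hAeq : pvLstA sf dps
        = ((pvLstA sf dps).map (fun p : Int × Int => p.1)).map (pvG (pvPairs sf dps)) := by
      rw [hAfst]; exact hl
    have hperm : (pvScanB (PySem.List.sorted (pvPairs sf dps) (fun p : Int × Int => p.1)) m).1.Perm
        (pvLstA sf dps) := by
      rw [hBeq, hAeq]
      exact hfstperm.map _
    exact (PySem.List.sorted_eq_of_perm_of_pairwise_lt _ _ _ hperm hpw).symm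
  · rw [pv_scan_max _ m hes_pw, pv_max_perm hes_perm m, pv_innerA_decompose]

-- appending the per-bucket median tuples to prepared[identifier]
theorem pv_append_fold {g : Int × List Int → Int × Int}
    (l : List (Int × List Int)) (d : PySem.Dict String (List (Int × Int))) (k : String) (acc : List (Int × Int)) :
    l.foldl (fun p pr => p.modify k [] (fun t => t ++ [g pr])) (d.insert k acc)
    = d.insert k (acc ++ l.map g) := by
  induction l generalizing acc with
  | nil => simp
  | cons pr l ih =>
    have h1 : (d.insert k acc).modify k [] (fun t => t ++ [g pr]) = d.insert k (acc ++ [g pr]) := by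
      simp [PySem.Dict.modify, PySem.Dict.getD_insert_self, PySem.Dict.insert_insert_self]
    rw [List.foldl_cons, h1, ih]
    simp

-- the two phase-1 step functions, written as a single dict insert
theorem pv_stepA_eq (sf : Int) (acc : PySem.Dict String (List (Int × Int)) × Int)
    (item : String × List (Int × Int)) :
    pvStepA sf acc item = (acc.1.insert item.1 (pvLstA sf item.2),
      (pvPairs sf item.2).foldl pvMax acc.2) := by
  show ((item.2.foldl (pvInnerA sf) (PySem.Dict.empty, acc.2)).1.items.foldl
      (fun p pr => p.modify item.1 [] (fun l => l ++ [(pr.1, pvMed pr.2)]))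
      (acc.1.insert item.1 []), (item.2.foldl (pvInnerA sf) (PySem.Dict.empty, acc.2)).2) = _
  rw [pv_innerA_decompose]
  rw [pv_append_fold (g := fun pr => (pr.1, pvMed pr.2))]
  rw [List.nil_append]
  rfl

theorem pv_stepB_eq (sf : Int) (acc : PySem.Dict String (List (Int × Int)) × Int)
    (item : String × List (Int × Int)) :
    pvStepB sf acc item = (acc.1.insert item.1 (pvRelF (pvLstA sf item.2)),
      (pvPairs sf item.2).foldl pvMax acc.2) := by
  show (acc.1.insert item.1 (pvScanB (PySem.List.sorted (pvPairs sf item.2) (fun p => p.1)) acc.2).1,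
      (pvScanB (PySem.List.sorted (pvPairs sf item.2) (fun p => p.1)) acc.2).2) = _
  obtain ⟨h1, h2⟩ := pv_msB_eq sf item.2 acc.2
  rw [h1, h2, pv_innerA_decompose]

theorem pv_insert_rel (f : List (Int × Int) → List (Int × Int))
    (dA dB : PySem.Dict String (List (Int × Int)))
    (h : dB.items = dA.items.map (fun p => (p.1, f p.2)))
    (k : String) (v : List (Int × Int)) :
    (dB.insert k (f v)).items = ((dA.insert k v).items).map (fun p => (p.1, f p.2)) := by
  have hkeys : dB.keys = dA.keys := by
    show dB.items.map (·.1) = dA.items.map (·.1)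
    rw [h, List.map_map]; rfl
  have hk : dB.contains k = dA.contains k := by
    rw [PySem.Dict.contains_eq_decide_mem_keys, PySem.Dict.contains_eq_decide_mem_keys, hkeys]
  by_cases hc : dA.contains k = true
  · rw [PySem.Dict.items_insert_of_contains dB _ (hk.trans hc),
      PySem.Dict.items_insert_of_contains dA _ hc, h, List.map_map, List.map_map]
    apply List.map_congr_left
    intro p _
    by_cases hp : (p.1 == k) = true
    · simp only [Function.comp_apply, hp, if_pos]
    · simp only [Bool.not_eq_true] at hp
      simp only [Function.comp_apply, hp, Bool.false_eq_true, if_false]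
  · have hc' : dA.contains k = false := by simpa using hc
    rw [PySem.Dict.items_insert_of_not_contains dB _ (by rw [hk]; exact hc'),
      PySem.Dict.items_insert_of_not_contains dA _ hc', h, List.map_append]
    rfl

-- the phase-1 invariant over the whole identifier loop
theorem pv_phase1 (sf : Int) (cs : List (String × List (Int × Int)))
    (accA accB : PySem.Dict String (List (Int × Int)) × Int)
    (hrel : accB.1.items = accA.1.items.map (fun p => (p.1, pvRelF p.2))) (hm : accB.2 = accA.2)
    (hnd : accA.1.keys.Nodup)
    (hv : ∀ p ∈ accA.1.items, (p.2.map (fun x : Int × Int => x.1)).Nodup) :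
    (cs.foldl (pvStepB sf) accB).1.items
        = (cs.foldl (pvStepA sf) accA).1.items.map (fun p => (p.1, pvRelF p.2))
      ∧ (cs.foldl (pvStepB sf) accB).2 = (cs.foldl (pvStepA sf) accA).2
      ∧ (cs.foldl (pvStepA sf) accA).1.keys.Nodup
      ∧ ∀ p ∈ (cs.foldl (pvStepA sf) accA).1.items, (p.2.map (fun x : Int × Int => x.1)).Nodup := by
  induction cs generalizing accA accB with
  | nil => exact ⟨hrel, hm, hnd, hv⟩
  | cons item cs ih =>
    simp only [List.foldl_cons]
    apply ih
    · rw [pv_stepA_eq, pv_stepB_eq, hm]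
      exact pv_insert_rel pvRelF accA.1 accB.1 hrel item.1 (pvLstA sf item.2)
    · rw [pv_stepA_eq, pv_stepB_eq, hm]
    · rw [pv_stepA_eq]
      exact PySem.Dict.nodup_keys_insert _ _ _ hnd
    · rw [pv_stepA_eq]
      intro p hp
      rcases (PySem.Dict.mem_items_insert _ _ _ _).mp hp with h1 | h2
      · rw [h1]
        show ((pvLstA sf item.2).map (fun x : Int × Int => x.1)).Nodup
        rw [pv_lstA_fst]
        exact (pv_lstA_char sf item.2).2.1
      · exact hv p h2.1

-- phase-2 fold of A rewrites every stored list in place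
theorem pv_phase2_fold (F : List (Int × Int) → List (Int × Int))
    (ks : List String) (d : PySem.Dict String (List (Int × Int)))
    (hnd : d.keys.Nodup) (hks : ks.Nodup) (hsub : ∀ k ∈ ks, d.contains k = true) :
    (ks.foldl (fun p k => p.insert k (F (p.getD k []))) d).items
      = d.items.map (fun q => if q.1 ∈ ks then (q.1, F q.2) else q) := by
  induction ks generalizing d with
  | nil => simp
  | cons k ks ih =>
    have hck : d.contains k = true := hsub k (List.mem_cons_self ..)
    have hitems : (d.insert k (F (d.getD k []))).items
        = d.items.map (fun q => if q.1 = k then (q.1, F q.2) else q) := by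
      rw [PySem.Dict.items_insert_of_contains d _ hck]
      apply List.map_congr_left
      intro q hq
      by_cases hqk : q.1 = k
      · have hv : d.getD k [] = q.2 := by
          subst hqk
          exact PySem.Dict.getD_of_mem_items d (by simpa using hq) hnd []
        simp [hqk, hv]
      · simp [hqk]
    have hkeys : (d.insert k (F (d.getD k []))).keys = d.keys :=
      PySem.Dict.keys_insert_of_contains d _ hck
    have hndk : k ∉ ks := (List.nodup_cons.mp hks).1
    rw [List.foldl_cons,
      ih (d.insert k (F (d.getD k []))) (by rw [hkeys]; exact hnd) (List.nodup_cons.mp hks).2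
        (fun k' hk' => by
          rw [PySem.Dict.contains_eq_decide_mem_keys, hkeys,
            ← PySem.Dict.contains_eq_decide_mem_keys]
          exact hsub k' (List.mem_cons_of_mem _ hk')),
      hitems, List.map_map]
    apply List.map_congr_left
    intro q _
    by_cases hqk : q.1 = k
    · simp [Function.comp, hqk, hndk]
    · by_cases hqs : q.1 ∈ ks <;> simp [Function.comp, hqk, hqs]

-- membership in the merge result
theorem pv_merge_mem (ts : List Int) (ms : List (Int × Int)) (x : Int × Int)
    (hx : x ∈ pvMergeFill ts ms) : x ∈ ms ∨ (x.1 ∈ ts ∧ x.2 = 0) := by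
  fun_induction pvMergeFill ts ms with
  | case1 ms => exact Or.inl hx
  | case2 t ts ih =>
    rcases List.mem_cons.mp hx with rfl | hx
    · exact Or.inr ⟨List.mem_cons_self .., rfl⟩
    · rcases ih hx with h | ⟨h1, h2⟩
      · cases h
      · exact Or.inr ⟨List.mem_cons_of_mem _ h1, h2⟩
  | case3 t ts tm v ms hlt ih =>
    rcases List.mem_cons.mp hx with rfl | hx
    · exact Or.inl (List.mem_cons_self ..)
    · rcases ih hx with h | ⟨h1, h2⟩
      · exact Or.inl (List.mem_cons_of_mem _ h)
      · exact Or.inr ⟨h1, h2⟩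
  | case4 ts tm v ms hlt ih =>
    rcases List.mem_cons.mp hx with rfl | hx
    · exact Or.inl (List.mem_cons_self ..)
    · rcases ih hx with h | ⟨h1, h2⟩
      · exact Or.inl (List.mem_cons_of_mem _ h)
      · exact Or.inr ⟨List.mem_cons_of_mem _ h1, h2⟩
  | case5 t ts tm v ms hlt heq ih =>
    rcases List.mem_cons.mp hx with rfl | hx
    · exact Or.inr ⟨List.mem_cons_self .., rfl⟩
    · rcases ih hx with h | ⟨h1, h2⟩
      · exact Or.inl h
      · exact Or.inr ⟨List.mem_cons_of_mem _ h1, h2⟩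

-- the merge of sorted inputs is strictly increasing in fst
theorem pv_merge_pairwise (ts : List Int) (ms : List (Int × Int))
    (hts : ts.Pairwise (· < ·)) (hms : ms.Pairwise (fun a b => a.1 < b.1)) :
    (pvMergeFill ts ms).Pairwise (fun a b => a.1 < b.1) := by
  fun_induction pvMergeFill ts ms with
  | case1 ms => exact hms
  | case2 t ts ih =>
    refine List.pairwise_cons.mpr ⟨?_, ih (List.pairwise_cons.mp hts).2 hms⟩
    intro y hy
    rcases pv_merge_mem _ _ y hy with h | ⟨h1, _⟩
    · cases h
    · exact (List.pairwise_cons.mp hts).1 y.1 h1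
  | case3 t ts tm v ms hlt ih =>
    obtain ⟨hms1, hms2⟩ := List.pairwise_cons.mp hms
    refine List.pairwise_cons.mpr ⟨?_, ih hts hms2⟩
    intro y hy
    rcases pv_merge_mem _ _ y hy with h | ⟨h1, _⟩
    · exact hms1 y h
    · rcases List.mem_cons.mp h1 with rfl | h1
      · exact hlt
      · have := (List.pairwise_cons.mp hts).1 y.1 h1
        omega
  | case4 ts tm v ms hlt ih =>
    obtain ⟨hms1, hms2⟩ := List.pairwise_cons.mp hms
    refine List.pairwise_cons.mpr ⟨?_, ih (List.pairwise_cons.mp hts).2 hms2⟩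
    intro y hy
    rcases pv_merge_mem _ _ y hy with h | ⟨h1, _⟩
    · exact hms1 y h
    · have := (List.pairwise_cons.mp hts).1 y.1 h1
      omega
  | case5 t ts tm v ms hlt heq ih =>
    refine List.pairwise_cons.mpr ⟨?_, ih (List.pairwise_cons.mp hts).2 hms⟩
    intro y hy
    rcases pv_merge_mem _ _ y hy with h | ⟨h1, _⟩
    · rcases List.mem_cons.mp h with rfl | h
      · omega
      · have := (List.pairwise_cons.mp hms).1 y h
        omega
    · exact (List.pairwise_cons.mp hts).1 y.1 h1

-- the merge result is a permutation of medians ++ zero-filled missing timestamps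
theorem pv_merge_perm (ts : List Int) (ms : List (Int × Int))
    (hts : ts.Pairwise (· < ·)) (hms : ms.Pairwise (fun a b => a.1 < b.1)) :
    (pvMergeFill ts ms).Perm
      (ms ++ (ts.filter (fun t => decide (t ∉ ms.map (fun p : Int × Int => p.1)))).map
        (fun t => (t, (0:Int)))) := by
  fun_induction pvMergeFill ts ms with
  | case1 ms => simp
  | case2 t ts ih =>
    simp only [List.map_nil, List.nil_append] at *
    rw [List.filter_cons, if_pos (by simp)]
    exact (ih (List.pairwise_cons.mp hts).2 hms).cons _
  | case3 t ts tm v ms hlt ih =>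
    obtain ⟨hms1, hms2⟩ := List.pairwise_cons.mp hms
    have hfc : (t :: ts).filter (fun s => decide (s ∉ ((tm, v) :: ms).map (fun p : Int × Int => p.1)))
        = (t :: ts).filter (fun s => decide (s ∉ ms.map (fun p : Int × Int => p.1))) := by
      apply List.filter_congr
      intro s hs
      have hst : tm < s := by
        rcases List.mem_cons.mp hs with rfl | hs
        · exact hlt
        · have := (List.pairwise_cons.mp hts).1 s hs
          omega
      simp only [List.map_cons, List.mem_cons, decide_eq_decide]
      constructor
      · intro hn hm; exact hn (Or.inr hm)
      · intro hn hm
        rcases hm with rfl | hm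
        · omega
        · exact hn hm
    rw [hfc, List.cons_append]
    exact (ih hts hms2).cons _
  | case4 ts tm v ms hlt ih =>
    obtain ⟨hms1, hms2⟩ := List.pairwise_cons.mp hms
    have hfc : (tm :: ts).filter (fun s => decide (s ∉ ((tm, v) :: ms).map (fun p : Int × Int => p.1)))
        = ts.filter (fun s => decide (s ∉ ms.map (fun p : Int × Int => p.1))) := by
      rw [List.filter_cons, if_neg (by simp)]
      apply List.filter_congr
      intro s hs
      have hst : tm < s := by
        have := (List.pairwise_cons.mp hts).1 s hs
        omega
      simp only [List.map_cons, List.mem_cons, decide_eq_decide]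
      constructor
      · intro hn hm; exact hn (Or.inr hm)
      · intro hn hm
        rcases hm with rfl | hm
        · omega
        · exact hn hm
    rw [hfc, List.cons_append]
    exact (ih (List.pairwise_cons.mp hts).2 hms2).cons _
  | case5 t ts tm v ms hlt heq ih =>
    have hnotin : t ∉ ((tm, v) :: ms).map (fun p : Int × Int => p.1) := by
      simp only [List.map_cons, List.mem_cons]
      rintro (rfl | hmem)
      · omega
      · rcases List.mem_map.mp hmem with ⟨q, hq, hqe⟩
        have := (List.pairwise_cons.mp hms).1 q hq
        omega
    rw [List.filter_cons, if_pos (by simpa using hnotin), List.map_cons]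
    refine ((ih (List.pairwise_cons.mp hts).2 hms).cons (t, 0)).trans ?_
    exact (List.perm_middle).symm

theorem pv_pyRange_pairwise (a b : Int) : (PySem.List.pyRange a b 1).Pairwise (· < ·) := by
  have h : PySem.List.pyRange a b 1 = PySem.List.pyRange a b := rfl
  rw [h, PySem.List.pyRange_one, List.pairwise_map]
  exact (List.pairwise_lt_range).imp (by intro i j hij; omega)

-- per-identifier phase 2: A's fill-then-sort equals B's merge of the fst-sorted medians
theorem pv_core (M : Int) (lst : List (Int × Int))
    (hnd : (lst.map (fun p : Int × Int => p.1)).Nodup) :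
    pvFinA M lst = pvMergeFill (PySem.List.pyRange 0 M 1) (pvRelF lst) := by
  have hmsperm : (pvRelF lst).Perm lst := PySem.List.sorted_perm _ _ _
  have hmsfst_nodup : ((pvRelF lst).map (fun p : Int × Int => p.1)).Nodup :=
    (hmsperm.map (fun p : Int × Int => p.1)).nodup_iff.mpr hnd
  have hmslt : (pvRelF lst).Pairwise (fun a b => a.1 < b.1) := by
    have h1 : ((pvRelF lst).map (fun p : Int × Int => p.1)).Pairwise (· ≤ ·) :=
      PySem.List.sorted_map_key_pairwise _ _
    have h2 : ((pvRelF lst).map (fun p : Int × Int => p.1)).Pairwise (· < ·) :=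
      (h1.and hmsfst_nodup).imp (fun h => lt_of_le_of_ne h.1 h.2)
    exact List.pairwise_map.mp h2
  have hts := pv_pyRange_pairwise 0 M
  have hperm := pv_merge_perm (PySem.List.pyRange 0 M 1) (pvRelF lst) hts hmslt
  have hpw := pv_merge_pairwise (PySem.List.pyRange 0 M 1) (pvRelF lst) hts hmslt
  -- rewrite A's fill loop into lst ++ zeros
  have hif : (fun (l : List (Int × Int)) (timestamp : Int) =>
        if timestamp ∉ lst.map (fun x : Int × Int => x.1) then l ++ [(timestamp, (0:Int))] else l)
      = (fun (l : List (Int × Int)) (timestamp : Int) =>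
        if (decide (timestamp ∉ lst.map (fun x : Int × Int => x.1))) = true
          then l ++ [(timestamp, (0:Int))] else l) := by
    funext l s
    by_cases h : s ∈ lst.map (fun x : Int × Int => x.1) <;> simp [h]
  have hfill : pvFinA M lst = PySem.List.sorted
      (lst ++ ((PySem.List.pyRange 0 M 1).filter
        (fun s => decide (s ∉ lst.map (fun x : Int × Int => x.1)))).map (fun s => (s, (0:Int))))
      (fun x => x.1) := by
    rw [pvFinA, hif, PySem.List.foldl_append_if]
  rw [hfill]
  -- the zero filters over lst and over its sorted version agree
  have hfc : (PySem.List.pyRange 0 M 1).filter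
        (fun s => decide (s ∉ (pvRelF lst).map (fun p : Int × Int => p.1)))
      = (PySem.List.pyRange 0 M 1).filter
        (fun s => decide (s ∉ lst.map (fun x : Int × Int => x.1))) := by
    apply List.filter_congr
    intro s _
    simp only [decide_eq_decide]
    exact not_congr (hmsperm.map (fun p : Int × Int => p.1)).mem_iff
  apply PySem.List.sorted_eq_of_perm_of_pairwise_lt _ _ _ ?_ hpw
  refine hperm.trans ?_
  rw [hfc]
  exact (hmsperm.append_right _)

-- ===== VERDICT (by name: the statement is the Claim_ definition above) =====
theorem prepare_stats_spec : Claim_equal_prepare_stats := by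
  intro cs sf _hdom _hpre
  show prepare_stats cs sf = prepare_stats_alt cs sf
  obtain ⟨hrel, hm, hnd, hv⟩ := pv_phase1 sf cs (PySem.Dict.empty, 0) (PySem.Dict.empty, 0)
    rfl rfl PySem.Dict.nodup_keys_empty (by intro p hp; simp [PySem.Dict.empty] at hp)
  show ((cs.foldl (pvStepA sf) (PySem.Dict.empty, 0)).1.keys.foldl
      (fun p k => p.insert k (pvFinA (cs.foldl (pvStepA sf) (PySem.Dict.empty, 0)).2 (p.getD k [])))
      (cs.foldl (pvStepA sf) (PySem.Dict.empty, 0)).1).items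
    = (cs.foldl (pvStepB sf) (PySem.Dict.empty, 0)).1.items.map
        (fun p => (p.1, pvMergeFill (PySem.List.pyRange 0 (cs.foldl (pvStepB sf) (PySem.Dict.empty, 0)).2 1) p.2))
  rw [hm, hrel,
    pv_phase2_fold (pvFinA (cs.foldl (pvStepA sf) (PySem.Dict.empty, 0)).2)
      (cs.foldl (pvStepA sf) (PySem.Dict.empty, 0)).1.keys
      (cs.foldl (pvStepA sf) (PySem.Dict.empty, 0)).1 hnd hnd
      (fun k hk => by rw [PySem.Dict.contains_eq_decide_mem_keys]; simpa using hk),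
    List.map_map]
  apply List.map_congr_left
  intro q hq
  have hqk : q.1 ∈ (cs.foldl (pvStepA sf) (PySem.Dict.empty, 0)).1.keys := List.mem_map_of_mem hq
  simp only [hqk, if_pos, Function.comp_apply]
  rw [pv_core _ q.2 (hv q hq)]
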